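-- pv_equiv track=rewrite | github.com/ashrafino/EduPDF-Intelligence | scrapers/scraping_strategies.py | _parse_json_metadata
-- ===== SOURCE A (Python) =====
-- from typing import List, Dict, Optional, Set, Tuple, Any
--
-- def _parse_json_metadata(data: Dict, url: str) -> Dict[str, Any]:
--     """Parse metadata from JSON API response."""
--     metadata = {'url': url, 'content_type': 'application/json'}
--
--     # Common JSON metadata fields
--     field_mappings = {
--         'title': ['title', 'name', 'subject'],
--         'author': ['author', 'creator', 'authors'],
--         'description': ['description', 'abstract', 'summary'],
--         'keywords': ['keywords', 'tags', 'subjects'],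
--         'institution': ['institution', 'publisher', 'source']
--     }
--
--     for meta_key, json_keys in field_mappings.items():
--         for json_key in json_keys:
--             if json_key in data:
--                 metadata[meta_key] = data[json_key]
--                 break
--
--     return metadata
-- ===== SOURCE B (Python) =====
-- def _parse_json_metadata(data, url):
--     """Parse metadata from JSON API response (reverse-index single pass)."""
--     field_mappings = {
--         'title': ['title', 'name', 'subject'],
--         'author': ['author', 'creator', 'authors'],
--         'description': ['description', 'abstract', 'summary'],
--         'keywords': ['keywords', 'tags', 'subjects'],
--         'institution': ['institution', 'publisher', 'source']
--     }
--
--     reverse = {}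
--     for meta_key, json_keys in field_mappings.items():
--         for idx, json_key in enumerate(json_keys):
--             reverse[json_key] = (meta_key, idx)
--
--     best = {}
--     for key, value in data.items():
--         hit = reverse.get(key)
--         if hit is not None:
--             meta_key, idx = hit
--             if meta_key not in best or idx < best[meta_key][0]:
--                 best[meta_key] = (idx, value)
--
--     metadata = {'url': url, 'content_type': 'application/json'}
--     for meta_key in field_mappings:
--         if meta_key in best:
--             metadata[meta_key] = best[meta_key][1]
--     return metadata
-- ===== Notes on version B (the rewrite author's own statement) =====
-- stated objective: alternative
-- what changed: Replaces A's per-field scans over candidate-key lists with a precomputed reverse index (json_key -> (meta_key, priority)) and a single pass over the data entries tracking the best (lowest) priority per field, then emitting fields in the fixed mapping order.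
import Mathlib
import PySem

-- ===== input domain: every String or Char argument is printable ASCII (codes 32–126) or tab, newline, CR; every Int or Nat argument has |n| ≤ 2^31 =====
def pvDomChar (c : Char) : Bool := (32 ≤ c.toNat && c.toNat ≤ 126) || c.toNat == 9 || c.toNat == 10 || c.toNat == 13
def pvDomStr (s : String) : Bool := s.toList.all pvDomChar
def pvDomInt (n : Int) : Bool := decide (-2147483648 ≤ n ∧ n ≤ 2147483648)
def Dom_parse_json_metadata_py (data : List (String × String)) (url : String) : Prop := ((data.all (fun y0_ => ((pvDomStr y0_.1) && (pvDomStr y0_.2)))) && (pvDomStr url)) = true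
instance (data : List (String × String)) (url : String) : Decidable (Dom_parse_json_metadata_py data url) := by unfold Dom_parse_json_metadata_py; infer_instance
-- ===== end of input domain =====

-- B replaces A's per-field scans over candidate lists by a precomputed reverse index and a
-- single pass over the data entries tracking the best (lowest-priority-index) hit per field;
-- objective: alternative decomposition (data-driven single pass), same exact results.

-- the shared field_mappings table (a literal constant in both Pythons)
def pvMappings : List (String × List String) :=
  [("title", ["title", "name", "subject"]),
   ("author", ["author", "creator", "authors"]),
   ("description", ["description", "abstract", "summary"]),
   ("keywords", ["keywords", "tags", "subjects"]),
   ("institution", ["institution", "publisher", "source"])]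

-- ===== PORT A =====
-- inner loop: `for json_key in json_keys: if json_key in data: metadata[meta_key] = data[json_key]; break`
def pvFieldLoop (d : PySem.Dict String String) (md : PySem.Dict String String) (mk : String) :
    List String → PySem.Dict String String
  | [] => md
  | jk :: rest =>
    match d.get? jk with
    | some v => md.insert mk v
    | none => pvFieldLoop d md mk rest

def parse_json_metadata_py (data : List (String × String)) (url : String) : List (String × String) :=
  let d : PySem.Dict String String := PySem.Dict.mk data
  let metadata : PySem.Dict String String :=
    PySem.Dict.mk [("url", url), ("content_type", "application/json")]
  (pvMappings.foldl (fun md p => pvFieldLoop d md p.1 p.2) metadata).items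

-- ===== PORT B =====
-- reverse[json_key] = (meta_key, idx) for every candidate key
def pvRev : PySem.Dict String (String × Int) :=
  pvMappings.foldl
    (fun rev p => (PySem.List.enumerate p.2).foldl (fun rev e => rev.insert e.2 (p.1, e.1)) rev)
    PySem.Dict.empty

-- body of `for key, value in data.items(): …`
def pvStep (best : PySem.Dict String (Int × String)) (kv : String × String) :
    PySem.Dict String (Int × String) :=
  match pvRev.get? kv.1 with
  | none => best
  | some hit =>
    match best.get? hit.1 with
    | none => best.insert hit.1 (hit.2, kv.2)
    | some b => if hit.2 < b.1 then best.insert hit.1 (hit.2, kv.2) else best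

-- body of the final `for meta_key in field_mappings: if meta_key in best: …`
def pvPick (best : PySem.Dict String (Int × String)) (md : PySem.Dict String String)
    (mk : String) : PySem.Dict String String :=
  match best.get? mk with
  | some iv => md.insert mk iv.2
  | none => md

def parse_json_metadata_py_alt (data : List (String × String)) (url : String) : List (String × String) :=
  let best : PySem.Dict String (Int × String) := data.foldl pvStep PySem.Dict.empty
  let metadata : PySem.Dict String String :=
    PySem.Dict.mk [("url", url), ("content_type", "application/json")]
  (pvMappings.foldl (fun md p => pvPick best md p.1) metadata).items

-- ===== PRECONDITION & SPEC =====
def Spec_parse_json_metadata_py (data : List (String × String)) (url : String) (out : List (String × String)) : Prop := out = parse_json_metadata_py_alt data url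
instance (data : List (String × String)) (url : String) (out : List (String × String)) : Decidable (Spec_parse_json_metadata_py data url out) := by unfold Spec_parse_json_metadata_py; infer_instance

-- ===== CLAIM (what is proved, stated in full; the proofs are below) =====
def Claim_equal_parse_json_metadata_py : Prop := ∀ (data : List (String × String)) (url : String), Dom_parse_json_metadata_py data url → Spec_parse_json_metadata_py data url (parse_json_metadata_py data url)

-- ===== LEMMAS AND PROOFS =====

def pvUpd (acc : Option (Int × String)) (i : Int) (v : String) : Option (Int × String) :=
  match acc with
  | none => some (i, v)
  | some b => if i < b.1 then some (i, v) else acc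

def pvStep1 (mk : String) (acc : Option (Int × String)) (kv : String × String) :
    Option (Int × String) :=
  match pvRev.get? kv.1 with
  | none => acc
  | some hit => if hit.1 = mk then pvUpd acc hit.2 kv.2 else acc

def pvF3 (a b c : Option String) : Option (Int × String) :=
  match a with
  | some v => some (0, v)
  | none =>
    match b with
    | some v => some (1, v)
    | none =>
      match c with
      | some v => some (2, v)
      | none => none

def pvComb (acc : Option (Int × String)) (r : Option (Int × String)) : Option (Int × String) :=
  match r with
  | none => acc
  | some iv => pvUpd acc iv.1 iv.2

theorem pvComb_upd0 (v : String) (acc : Option (Int × String)) (g0 g1 g2 : Option String) :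
    pvComb (pvUpd acc 0 v) (pvF3 g0 g1 g2) = pvComb acc (pvF3 (some v) g1 g2) := by
  rcases g0 with _ | w0 <;> rcases g1 with _ | w1 <;> rcases g2 with _ | w2 <;>
    rcases acc with _ | ⟨b, u⟩ <;>
    simp only [pvF3, pvComb, pvUpd] <;> (try split_ifs) <;> (try simp_all) <;> omega

theorem pvComb_upd1 (v : String) (acc : Option (Int × String)) (g0 g1 g2 : Option String) :
    pvComb (pvUpd acc 1 v) (pvF3 g0 g1 g2) = pvComb acc (pvF3 g0 (some v) g2) := by
  rcases g0 with _ | w0 <;> rcases g1 with _ | w1 <;> rcases g2 with _ | w2 <;>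
    rcases acc with _ | ⟨b, u⟩ <;>
    simp only [pvF3, pvComb, pvUpd] <;> (try split_ifs) <;> (try simp_all) <;> omega

theorem pvComb_upd2 (v : String) (acc : Option (Int × String)) (g0 g1 g2 : Option String) :
    pvComb (pvUpd acc 2 v) (pvF3 g0 g1 g2) = pvComb acc (pvF3 g0 g1 (some v)) := by
  rcases g0 with _ | w0 <;> rcases g1 with _ | w1 <;> rcases g2 with _ | w2 <;>
    rcases acc with _ | ⟨b, u⟩ <;>
    simp only [pvF3, pvComb, pvUpd] <;> (try split_ifs) <;> (try simp_all) <;> omega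

theorem pvFold1_eq (mk k0 k1 k2 : String)
    (h0 : pvRev.get? k0 = some (mk, 0)) (h1 : pvRev.get? k1 = some (mk, 1))
    (h2 : pvRev.get? k2 = some (mk, 2))
    (honly : ∀ k hit, pvRev.get? k = some hit → hit.1 = mk → k = k0 ∨ k = k1 ∨ k = k2) :
    ∀ (l : List (String × String)) (acc : Option (Int × String)),
      l.foldl (pvStep1 mk) acc =
        pvComb acc (pvF3 ((PySem.Dict.mk l).get? k0) ((PySem.Dict.mk l).get? k1)
          ((PySem.Dict.mk l).get? k2)) := by
  have h01 : k0 ≠ k1 := fun h => by rw [h, h1] at h0; simp at h0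
  have h02 : k0 ≠ k2 := fun h => by rw [h, h2] at h0; simp at h0
  have h12 : k1 ≠ k2 := fun h => by rw [h, h2] at h1; simp at h1
  intro l
  induction l with
  | nil => intro acc; rfl
  | cons kv l ih =>
    intro acc
    obtain ⟨k, v⟩ := kv
    simp only [List.foldl_cons, ih, PySem.Dict.get?_mk_cons, beq_iff_eq]
    by_cases e0 : k = k0
    · subst e0
      simp only [pvStep1, h0, if_neg h01, if_neg h02]
      exact pvComb_upd0 ..
    · by_cases e1 : k = k1
      · subst e1
        simp only [pvStep1, h1, if_neg (Ne.symm h01), if_neg h12]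
        exact pvComb_upd1 ..
      · by_cases e2 : k = k2
        · subst e2
          simp only [pvStep1, h2, if_neg (Ne.symm h02), if_neg (Ne.symm h12)]
          exact pvComb_upd2 ..
        · rw [if_neg (fun h : k = k0 => e0 h), if_neg (fun h : k = k1 => e1 h),
            if_neg (fun h : k = k2 => e2 h)]
          have hstep : pvStep1 mk acc (k, v) = acc := by
            simp only [pvStep1]
            cases hr : pvRev.get? k with
            | none => rfl
            | some hit =>
              show (if hit.1 = mk then pvUpd acc hit.2 v else acc) = acc
              rw [if_neg]
              intro hm
              rcases honly k hit hr hm with h | h | h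
              · exact e0 h
              · exact e1 h
              · exact e2 h
          rw [hstep]


def pvIns (md : PySem.Dict String String) (mk : String) (o : Option String) : PySem.Dict String String :=
  match o with
  | some v => md.insert mk v
  | none => md

-- A's per-field result
def pvSelA (d : PySem.Dict String String) : List String → Option String
  | [] => none
  | jk :: rest =>
    match d.get? jk with
    | some v => some v
    | none => pvSelA d rest

theorem pvFieldLoop_eq_ins (d : PySem.Dict String String) (md : PySem.Dict String String)
    (mk : String) (ks : List String) : pvFieldLoop d md mk ks = pvIns md mk (pvSelA d ks) := by
  induction ks with
  | nil => rfl
  | cons jk rest ih =>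
    simp only [pvFieldLoop, pvSelA]
    cases d.get? jk <;> simp [pvIns, ih]

theorem pvStep_get? (best : PySem.Dict String (Int × String)) (kv : String × String)
    (mk : String) : (pvStep best kv).get? mk = pvStep1 mk (best.get? mk) kv := by
  simp only [pvStep, pvStep1]
  cases hr : pvRev.get? kv.1 with
  | none => rfl
  | some hit =>
    by_cases hmk : hit.1 = mk
    · subst hmk
      cases hb : best.get? hit.1 with
      | none => simp [hb, pvUpd]
      | some b =>
        simp only [hb, pvUpd]
        split_ifs with h
        · simp
        · exact hb
    · have hne : mk ≠ hit.1 := fun h => hmk h.symm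
      cases hb : best.get? hit.1 with
      | none => simp [hb, PySem.Dict.get?_insert_of_ne best (hit.2, kv.2) hne, hmk]
      | some b =>
        simp only [hb]
        split_ifs with h
        · simp [PySem.Dict.get?_insert_of_ne best (hit.2, kv.2) hne, hmk]
        · simp [hmk]

theorem pvFold_get? (l : List (String × String)) (best : PySem.Dict String (Int × String))
    (mk : String) : (l.foldl pvStep best).get? mk = l.foldl (pvStep1 mk) (best.get? mk) := by
  induction l generalizing best with
  | nil => rfl
  | cons kv l ih => simp only [List.foldl_cons, ih, pvStep_get?]

theorem pvRev_eq : pvRev = PySem.Dict.mk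
    [("title", ("title", 0)), ("name", ("title", 1)), ("subject", ("title", 2)),
     ("author", ("author", 0)), ("creator", ("author", 1)), ("authors", ("author", 2)),
     ("description", ("description", 0)), ("abstract", ("description", 1)), ("summary", ("description", 2)),
     ("keywords", ("keywords", 0)), ("tags", ("keywords", 1)), ("subjects", ("keywords", 2)),
     ("institution", ("institution", 0)), ("publisher", ("institution", 1)), ("source", ("institution", 2))] := rfl

theorem pvRev_get_title : pvRev.get? "title" = some ("title", 0) := rfl
theorem pvRev_get_name : pvRev.get? "name" = some ("title", 1) := rfl
theorem pvRev_get_subject : pvRev.get? "subject" = some ("title", 2) := rfl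
theorem pvRev_get_author : pvRev.get? "author" = some ("author", 0) := rfl
theorem pvRev_get_creator : pvRev.get? "creator" = some ("author", 1) := rfl
theorem pvRev_get_authors : pvRev.get? "authors" = some ("author", 2) := rfl
theorem pvRev_get_description : pvRev.get? "description" = some ("description", 0) := rfl
theorem pvRev_get_abstract : pvRev.get? "abstract" = some ("description", 1) := rfl
theorem pvRev_get_summary : pvRev.get? "summary" = some ("description", 2) := rfl
theorem pvRev_get_keywords : pvRev.get? "keywords" = some ("keywords", 0) := rfl
theorem pvRev_get_tags : pvRev.get? "tags" = some ("keywords", 1) := rfl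
theorem pvRev_get_subjects : pvRev.get? "subjects" = some ("keywords", 2) := rfl
theorem pvRev_get_institution : pvRev.get? "institution" = some ("institution", 0) := rfl
theorem pvRev_get_publisher : pvRev.get? "publisher" = some ("institution", 1) := rfl
theorem pvRev_get_source : pvRev.get? "source" = some ("institution", 2) := rfl

theorem honly_title : ∀ k hit, pvRev.get? k = some hit → hit.1 = "title" →
    k = "title" ∨ k = "name" ∨ k = "subject" := by
  intro k hit h hm
  have hmem : (k, hit) ∈ pvRev.items := PySem.Dict.mem_items_of_get?_eq_some _ h
  rw [pvRev_eq] at hmem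
  simp only [List.mem_cons, List.not_mem_nil, or_false] at hmem
  simp only [Prod.mk.injEq] at hmem
  rcases hmem with ⟨hk, hh⟩ | ⟨hk, hh⟩ | ⟨hk, hh⟩ | ⟨hk, hh⟩ | ⟨hk, hh⟩ | ⟨hk, hh⟩ | ⟨hk, hh⟩ | ⟨hk, hh⟩ | ⟨hk, hh⟩ | ⟨hk, hh⟩ | ⟨hk, hh⟩ | ⟨hk, hh⟩ | ⟨hk, hh⟩ | ⟨hk, hh⟩ | ⟨hk, hh⟩ <;> subst hh <;> simp_all

theorem honly_author : ∀ k hit, pvRev.get? k = some hit → hit.1 = "author" →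
    k = "author" ∨ k = "creator" ∨ k = "authors" := by
  intro k hit h hm
  have hmem : (k, hit) ∈ pvRev.items := PySem.Dict.mem_items_of_get?_eq_some _ h
  rw [pvRev_eq] at hmem
  simp only [List.mem_cons, List.not_mem_nil, or_false] at hmem
  simp only [Prod.mk.injEq] at hmem
  rcases hmem with ⟨hk, hh⟩ | ⟨hk, hh⟩ | ⟨hk, hh⟩ | ⟨hk, hh⟩ | ⟨hk, hh⟩ | ⟨hk, hh⟩ | ⟨hk, hh⟩ | ⟨hk, hh⟩ | ⟨hk, hh⟩ | ⟨hk, hh⟩ | ⟨hk, hh⟩ | ⟨hk, hh⟩ | ⟨hk, hh⟩ | ⟨hk, hh⟩ | ⟨hk, hh⟩ <;> subst hh <;> simp_all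

theorem honly_description : ∀ k hit, pvRev.get? k = some hit → hit.1 = "description" →
    k = "description" ∨ k = "abstract" ∨ k = "summary" := by
  intro k hit h hm
  have hmem : (k, hit) ∈ pvRev.items := PySem.Dict.mem_items_of_get?_eq_some _ h
  rw [pvRev_eq] at hmem
  simp only [List.mem_cons, List.not_mem_nil, or_false] at hmem
  simp only [Prod.mk.injEq] at hmem
  rcases hmem with ⟨hk, hh⟩ | ⟨hk, hh⟩ | ⟨hk, hh⟩ | ⟨hk, hh⟩ | ⟨hk, hh⟩ | ⟨hk, hh⟩ | ⟨hk, hh⟩ | ⟨hk, hh⟩ | ⟨hk, hh⟩ | ⟨hk, hh⟩ | ⟨hk, hh⟩ | ⟨hk, hh⟩ | ⟨hk, hh⟩ | ⟨hk, hh⟩ | ⟨hk, hh⟩ <;> subst hh <;> simp_all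

theorem honly_keywords : ∀ k hit, pvRev.get? k = some hit → hit.1 = "keywords" →
    k = "keywords" ∨ k = "tags" ∨ k = "subjects" := by
  intro k hit h hm
  have hmem : (k, hit) ∈ pvRev.items := PySem.Dict.mem_items_of_get?_eq_some _ h
  rw [pvRev_eq] at hmem
  simp only [List.mem_cons, List.not_mem_nil, or_false] at hmem
  simp only [Prod.mk.injEq] at hmem
  rcases hmem with ⟨hk, hh⟩ | ⟨hk, hh⟩ | ⟨hk, hh⟩ | ⟨hk, hh⟩ | ⟨hk, hh⟩ | ⟨hk, hh⟩ | ⟨hk, hh⟩ | ⟨hk, hh⟩ | ⟨hk, hh⟩ | ⟨hk, hh⟩ | ⟨hk, hh⟩ | ⟨hk, hh⟩ | ⟨hk, hh⟩ | ⟨hk, hh⟩ | ⟨hk, hh⟩ <;> subst hh <;> simp_all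

theorem honly_institution : ∀ k hit, pvRev.get? k = some hit → hit.1 = "institution" →
    k = "institution" ∨ k = "publisher" ∨ k = "source" := by
  intro k hit h hm
  have hmem : (k, hit) ∈ pvRev.items := PySem.Dict.mem_items_of_get?_eq_some _ h
  rw [pvRev_eq] at hmem
  simp only [List.mem_cons, List.not_mem_nil, or_false] at hmem
  simp only [Prod.mk.injEq] at hmem
  rcases hmem with ⟨hk, hh⟩ | ⟨hk, hh⟩ | ⟨hk, hh⟩ | ⟨hk, hh⟩ | ⟨hk, hh⟩ | ⟨hk, hh⟩ | ⟨hk, hh⟩ | ⟨hk, hh⟩ | ⟨hk, hh⟩ | ⟨hk, hh⟩ | ⟨hk, hh⟩ | ⟨hk, hh⟩ | ⟨hk, hh⟩ | ⟨hk, hh⟩ | ⟨hk, hh⟩ <;> subst hh <;> simp_all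

theorem pvComb_none (r : Option (Int × String)) : pvComb none r = r := by
  rcases r with _ | ⟨i, v⟩ <;> rfl

theorem pvF3_map_snd (d : PySem.Dict String String) (k0 k1 k2 : String) :
    (pvF3 (d.get? k0) (d.get? k1) (d.get? k2)).map (·.2) = pvSelA d [k0, k1, k2] := by
  rcases h0 : d.get? k0 with _ | w0 <;> rcases h1 : d.get? k1 with _ | w1 <;>
    rcases h2 : d.get? k2 with _ | w2 <;> simp [pvF3, pvSelA, h0, h1, h2]

theorem best_get_title (data : List (String × String)) :
    (((data.foldl pvStep PySem.Dict.empty).get? "title").map (·.2)) =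
      pvSelA (PySem.Dict.mk data) ["title", "name", "subject"] := by
  rw [pvFold_get?, PySem.Dict.get?_empty,
    pvFold1_eq "title" "title" "name" "subject" pvRev_get_title pvRev_get_name pvRev_get_subject honly_title data none,
    pvComb_none, pvF3_map_snd]

theorem best_get_author (data : List (String × String)) :
    (((data.foldl pvStep PySem.Dict.empty).get? "author").map (·.2)) =
      pvSelA (PySem.Dict.mk data) ["author", "creator", "authors"] := by
  rw [pvFold_get?, PySem.Dict.get?_empty,
    pvFold1_eq "author" "author" "creator" "authors" pvRev_get_author pvRev_get_creator pvRev_get_authors honly_author data none,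
    pvComb_none, pvF3_map_snd]

theorem best_get_description (data : List (String × String)) :
    (((data.foldl pvStep PySem.Dict.empty).get? "description").map (·.2)) =
      pvSelA (PySem.Dict.mk data) ["description", "abstract", "summary"] := by
  rw [pvFold_get?, PySem.Dict.get?_empty,
    pvFold1_eq "description" "description" "abstract" "summary" pvRev_get_description pvRev_get_abstract pvRev_get_summary honly_description data none,
    pvComb_none, pvF3_map_snd]

theorem best_get_keywords (data : List (String × String)) :
    (((data.foldl pvStep PySem.Dict.empty).get? "keywords").map (·.2)) =
      pvSelA (PySem.Dict.mk data) ["keywords", "tags", "subjects"] := by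
  rw [pvFold_get?, PySem.Dict.get?_empty,
    pvFold1_eq "keywords" "keywords" "tags" "subjects" pvRev_get_keywords pvRev_get_tags pvRev_get_subjects honly_keywords data none,
    pvComb_none, pvF3_map_snd]

theorem best_get_institution (data : List (String × String)) :
    (((data.foldl pvStep PySem.Dict.empty).get? "institution").map (·.2)) =
      pvSelA (PySem.Dict.mk data) ["institution", "publisher", "source"] := by
  rw [pvFold_get?, PySem.Dict.get?_empty,
    pvFold1_eq "institution" "institution" "publisher" "source" pvRev_get_institution pvRev_get_publisher pvRev_get_source honly_institution data none,
    pvComb_none, pvF3_map_snd]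

theorem pvPick_eq (best : PySem.Dict String (Int × String)) (md : PySem.Dict String String)
    (mk : String) : pvPick best md mk = pvIns md mk ((best.get? mk).map (·.2)) := by
  unfold pvPick
  rcases best.get? mk with _ | ⟨i, v⟩ <;> rfl

-- ===== VERDICT (by name: the statement is the Claim_ definition above) =====
theorem parse_json_metadata_py_spec : Claim_equal_parse_json_metadata_py := by
  intro data url _
  show parse_json_metadata_py data url = parse_json_metadata_py_alt data url
  unfold parse_json_metadata_py parse_json_metadata_py_alt
  simp only [pvMappings, List.foldl_cons, List.foldl_nil, pvFieldLoop_eq_ins, pvPick_eq]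
  rw [best_get_title, best_get_author, best_get_description, best_get_keywords,
    best_get_institution]
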